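-- pv_equiv track=rewrite | github.com/wesg52/universal-neurons | analysis/vocab_df.py | create_normalized_vocab
-- ===== SOURCE A (Python) =====
-- def create_normalized_vocab(vocab_df, decoded_vocab):
--     # create index of unique tokens when lowercased and stripped
--     normed_vocab = {}
--     for i in range(len(vocab_df)):
--         norm_vocab = decoded_vocab[i].lower().strip()
--         if norm_vocab not in normed_vocab:
--             normed_vocab[norm_vocab] = [i]
--         else:
--             normed_vocab[norm_vocab].append(i)
--
--     decoded_norm_vocab = {}
--     token_ix_2_normed_ix = {}
--     for normed_ix, (normed_str, token_ixs) in enumerate(normed_vocab.items()):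
--         for token_ix in token_ixs:
--             token_ix_2_normed_ix[token_ix] = normed_ix
--         decoded_norm_vocab[normed_ix] = normed_str
--
--     return decoded_norm_vocab, token_ix_2_normed_ix
-- ===== SOURCE B (Python) =====
-- def create_normalized_vocab(vocab_df, decoded_vocab):
--     n = len(vocab_df)
--     normed = [decoded_vocab[i].lower().strip() for i in range(n)]
--     str2ix = {}
--     for s in normed:
--         if s not in str2ix:
--             str2ix[s] = len(str2ix)
--     decoded_norm_vocab = {ix: s for s, ix in str2ix.items()}
--     token_ix_2_normed_ix = {i: str2ix[normed[i]] for i in range(n)}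
--     return decoded_norm_vocab, token_ix_2_normed_ix
-- ===== Notes on version B (the rewrite author's own statement) =====
-- stated objective: simpler
-- what changed: Replaces A's dict-of-index-lists grouping plus a second enumerate pass over the groups by a single first-appearance counter dict str2ix and two direct comprehensions; Pre_ additionally excludes inputs where a normalized token reappears after a different one intervened, on which the iteration order of A's token_ix_2_normed_ix dict (grouped by normalized form) is an accident of the grouping, while B emits it in token order -- the mappings' contents are identical there.
import Mathlib
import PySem

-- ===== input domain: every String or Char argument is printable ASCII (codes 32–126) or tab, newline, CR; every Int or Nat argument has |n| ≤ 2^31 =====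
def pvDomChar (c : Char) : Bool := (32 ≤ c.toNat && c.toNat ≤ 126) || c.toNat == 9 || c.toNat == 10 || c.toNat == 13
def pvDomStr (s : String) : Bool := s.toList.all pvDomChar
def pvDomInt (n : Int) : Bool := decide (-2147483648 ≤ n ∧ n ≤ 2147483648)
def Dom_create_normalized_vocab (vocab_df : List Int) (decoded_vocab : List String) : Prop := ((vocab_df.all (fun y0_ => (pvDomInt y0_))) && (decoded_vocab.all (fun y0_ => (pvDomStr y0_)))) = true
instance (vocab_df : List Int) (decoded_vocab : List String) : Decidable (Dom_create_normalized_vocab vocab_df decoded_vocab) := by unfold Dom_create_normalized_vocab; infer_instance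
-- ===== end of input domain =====

-- B replaces A's dict-of-index-lists grouping and second enumerate pass by a single first-appearance
-- counter dict and two direct comprehensions (objective: simpler; not measured faster).

-- shared helper: decoded_vocab[i].lower().strip()  (both Pythons compute this expression)
def pvNormA (decoded_vocab : List String) (i : Int) : String :=
  PySem.Str.strip (PySem.Str.lower (PySem.List.pyGetD decoded_vocab i ""))

-- ===== PORT A =====
def create_normalized_vocab (vocab_df : List Int) (decoded_vocab : List String) : (List (Int × String)) × (List (Int × Int)) :=
  -- for i in range(len(vocab_df)): norm = decoded[i].lower().strip(); if norm not in d: d[norm]=[i] else d[norm].append(i)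
  let normed_vocab : PySem.Dict String (List Int) :=
    (PySem.List.pyRange 0 (vocab_df.length : Int) 1).foldl
      (fun d i =>
        let norm_vocab := pvNormA decoded_vocab i
        if d.contains norm_vocab = false then d.insert norm_vocab [i]
        else d.modify norm_vocab [] (fun l => l ++ [i]))
      PySem.Dict.empty
  -- for normed_ix, (normed_str, token_ixs) in enumerate(d.items()): …
  let res : PySem.Dict Int String × PySem.Dict Int Int :=
    (PySem.List.enumerate normed_vocab.items).foldl
      (fun acc p =>
        (acc.1.insert p.1 p.2.1,
         p.2.2.foldl (fun t token_ix => t.insert token_ix p.1) acc.2))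
      (PySem.Dict.empty, PySem.Dict.empty)
  (res.1.items, res.2.items)

-- ===== PORT B =====
def create_normalized_vocab_alt (vocab_df : List Int) (decoded_vocab : List String) : (List (Int × String)) × (List (Int × Int)) :=
  let n : Int := (vocab_df.length : Int)
  -- normed = [decoded_vocab[i].lower().strip() for i in range(n)]
  let normed : List String := (PySem.List.pyRange 0 n 1).map (fun i => pvNormA decoded_vocab i)
  -- for s in normed: if s not in str2ix: str2ix[s] = len(str2ix)
  let str2ix : PySem.Dict String Int :=
    normed.foldl (fun d s => if d.contains s = false then d.insert s (d.size : Int) else d) PySem.Dict.empty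
  -- decoded_norm_vocab = {ix: s for s, ix in str2ix.items()}
  let decoded_norm_vocab : PySem.Dict Int String :=
    PySem.Dict.ofList (str2ix.items.map (fun p => (p.2, p.1)))
  -- token_ix_2_normed_ix = {i: str2ix[normed[i]] for i in range(n)}   (the key is always present; getD's default is never used)
  let token_ix_2_normed_ix : PySem.Dict Int Int :=
    PySem.Dict.ofList ((PySem.List.pyRange 0 n 1).map
      (fun i => (i, str2ix.getD (PySem.List.pyGetD normed i "") 0)))
  (decoded_norm_vocab.items, token_ix_2_normed_ix.items)

-- ===== PRECONDITION & SPEC =====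
-- Pre_ excludes (a) inputs where Python A raises IndexError (len(vocab_df) > len(decoded_vocab)),
-- and (b) inputs where some normalized token reappears after a different normalized token intervened:
-- there the iteration order of A's token_ix_2_normed_ix dict (grouped by normalized form) is an
-- accident of A's grouping; B returns the same mapping in token order (equal as Python dicts).
def Pre_create_normalized_vocab (vocab_df : List Int) (decoded_vocab : List String) : Prop :=
  vocab_df.length ≤ decoded_vocab.length ∧
  ∀ j : Nat, j < vocab_df.length →
    (∃ i : Nat, i < j ∧ pvNormA decoded_vocab (i : Int) = pvNormA decoded_vocab (j : Int)) →
    0 < j ∧ pvNormA decoded_vocab ((j - 1 : Nat) : Int) = pvNormA decoded_vocab (j : Int)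
instance (vocab_df : List Int) (decoded_vocab : List String) : Decidable (Pre_create_normalized_vocab vocab_df decoded_vocab) := by unfold Pre_create_normalized_vocab; infer_instance
def pvWitness_create_normalized_vocab : List Int × List String := ([7, -2, 5], ["Ab ", " aB", "cd"])
def Spec_create_normalized_vocab (vocab_df : List Int) (decoded_vocab : List String) (out : (List (Int × String)) × (List (Int × Int))) : Prop := out = create_normalized_vocab_alt vocab_df decoded_vocab
instance (vocab_df : List Int) (decoded_vocab : List String) (out : (List (Int × String)) × (List (Int × Int))) : Decidable (Spec_create_normalized_vocab vocab_df decoded_vocab out) := by unfold Spec_create_normalized_vocab; infer_instance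

-- ===== CLAIM (what is proved, stated in full; the proofs are below) =====
def Claim_equal_create_normalized_vocab : Prop := ∀ (vocab_df : List Int) (decoded_vocab : List String), Dom_create_normalized_vocab vocab_df decoded_vocab → Pre_create_normalized_vocab vocab_df decoded_vocab → Spec_create_normalized_vocab vocab_df decoded_vocab (create_normalized_vocab vocab_df decoded_vocab)

-- ===== LEMMAS AND PROOFS =====

-- the distinct normalized strings of the first m tokens, in first-appearance order
def pvK (dv : List String) (m : Nat) : List String :=
  PySem.Set.ofList ((PySem.List.pyRange 0 (m : Int) 1).map (pvNormA dv))

-- the token indices whose normalized string is s, in increasing order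
def pvGrp (dv : List String) (n : Nat) (s : String) : List Int :=
  (PySem.List.pyRange 0 (n : Int) 1).filter (fun i => pvNormA dv i == s)

lemma pvK_nodup (dv : List String) (m : Nat) : (pvK dv m).Nodup :=
  PySem.Set.nodup_ofList _

lemma pvRangeSucc (m : Nat) :
    PySem.List.pyRange 0 ((m + 1 : Nat) : Int) 1 = PySem.List.pyRange 0 (m : Int) 1 ++ [(m : Int)] := by
  have hc : ((m + 1 : Nat) : Int) = (m : Int) + 1 := by push_cast; ring
  rw [hc, PySem.List.pyRange_one_succ_right (Int.natCast_nonneg m)]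

lemma pvKsucc (dv : List String) (m : Nat) :
    pvK dv (m + 1) = PySem.Set.add (pvK dv m) (pvNormA dv (m : Int)) := by
  unfold pvK
  rw [pvRangeSucc, List.map_append]
  simpa using PySem.Set.ofList_append_singleton ((PySem.List.pyRange 0 (m : Int) 1).map (pvNormA dv)) (pvNormA dv (m : Int))

lemma pvGsucc (dv : List String) (m : Nat) (s : String) :
    pvGrp dv (m + 1) s = pvGrp dv m s ++ (if pvNormA dv (m : Int) == s then [(m : Int)] else []) := by
  unfold pvGrp
  rw [pvRangeSucc, List.filter_append]
  simp [List.filter_cons]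

lemma pvGrpNil (dv : List String) (m : Nat) (hmem : pvNormA dv (m : Int) ∉ pvK dv m) :
    pvGrp dv m (pvNormA dv (m : Int)) = [] := by
  unfold pvGrp
  rw [List.filter_eq_nil_iff]
  intro i hi hbe
  exact hmem (by
    unfold pvK
    rw [PySem.Set.mem_ofList]
    exact (eq_of_beq hbe) ▸ List.mem_map_of_mem hi)

-- membership test of a literal dict, through its key list
lemma pvAnyKey {V : Type} (L : List (String × V)) (K : List String)
    (hK : L.map (fun p => p.1) = K) (x : String) :
    (PySem.Dict.mk L).contains x = decide (x ∈ K) := by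
  subst hK
  induction L with
  | nil => simp [PySem.Dict.contains]
  | cons p L ih =>
    simp only [PySem.Dict.contains, List.any_cons, List.map_cons, List.mem_cons] at *
    by_cases h : p.1 = x
    · simp [h]
    · have h1 : (p.1 == x) = false := by simp [h]
      have h2 : (x = p.1) ↔ False := ⟨fun hx => h hx.symm, False.elim⟩
      simp [h1, h2, ih]

lemma pvMapFstA (dv : List String) (m : Nat) :
    ((pvK dv m).map (fun s => (s, pvGrp dv m s))).map (fun p => p.1) = pvK dv m := by
  rw [List.map_map]
  simp [Function.comp_def]

lemma pvMapFstB (dv : List String) (m : Nat) :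
    ((PySem.List.enumerate (pvK dv m) 0).map (fun p => (p.2, p.1))).map (fun p => p.1) = pvK dv m := by
  rw [List.map_map]
  have h : ((fun p : String × Int => p.1) ∘ (fun p : Int × String => (p.2, p.1)))
      = fun p : Int × String => p.2 := rfl
  rw [h]
  exact PySem.List.map_snd_enumerate (pvK dv m) 0

-- A's grouping loop builds exactly the canonical grouped dict
lemma pvPhiA (dv : List String) (m : Nat) :
    ((PySem.List.pyRange 0 (m : Int) 1).foldl
      (fun d i =>
        if d.contains (pvNormA dv i) = false then d.insert (pvNormA dv i) [i]
        else d.modify (pvNormA dv i) [] (fun l => l ++ [i]))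
      PySem.Dict.empty)
    = PySem.Dict.mk ((pvK dv m).map (fun s => (s, pvGrp dv m s))) := by
  induction m with
  | zero =>
    have h0 : PySem.List.pyRange 0 ((0 : Nat) : Int) 1 = [] :=
      PySem.List.pyRange_one_eq_nil (by norm_num)
    rw [h0]
    simp [pvK, PySem.Set.ofList_nil, PySem.Dict.empty]
  | succ m ih =>
    rw [pvRangeSucc, List.foldl_append, ih]
    simp only [List.foldl_cons, List.foldl_nil]
    by_cases hmem : pvNormA dv (m : Int) ∈ pvK dv m
    · -- existing key: the modify branch extends the group in place
      have hcont : (PySem.Dict.mk ((pvK dv m).map (fun s => (s, pvGrp dv m s)))).contains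
          (pvNormA dv (m : Int)) = true := by
        rw [pvAnyKey _ _ (pvMapFstA dv m)]
        exact decide_eq_true hmem
      have hmemitem : (pvNormA dv (m : Int), pvGrp dv m (pvNormA dv (m : Int)))
          ∈ (pvK dv m).map (fun s => (s, pvGrp dv m s)) := List.mem_map_of_mem hmem
      have hkeys : (PySem.Dict.mk ((pvK dv m).map (fun s => (s, pvGrp dv m s)))).keys.Nodup := by
        have : (PySem.Dict.mk ((pvK dv m).map (fun s => (s, pvGrp dv m s)))).keys = pvK dv m := pvMapFstA dv m
        rw [this]; exact pvK_nodup dv m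
      have hgetD := PySem.Dict.getD_of_mem_items _ hmemitem hkeys []
      have haddeq : PySem.Set.add (pvK dv m) (pvNormA dv (m : Int)) = pvK dv m := by
        simp only [PySem.Set.add]
        rw [if_pos ((PySem.Set.contains_iff _ _).mpr hmem)]
      simp only [hcont, Bool.true_eq_false, if_false]
      simp only [PySem.Dict.modify, hgetD, PySem.Dict.insert, hcont, if_true]
      rw [pvKsucc, haddeq]
      apply congrArg PySem.Dict.mk
      rw [List.map_map]
      apply List.map_congr_left
      intro s hs
      simp only [Function.comp_def, pvGsucc]
      by_cases hsx : s = pvNormA dv (m : Int)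
      · subst hsx
        simp
      · have h1 : (s == pvNormA dv (m : Int)) = false := by simp [hsx]
        have h2 : (pvNormA dv (m : Int) == s) = false := by simp [Ne.symm hsx]
        simp [h1, h2]
    · -- new key: insert appends a fresh singleton group
      have hcont : (PySem.Dict.mk ((pvK dv m).map (fun s => (s, pvGrp dv m s)))).contains
          (pvNormA dv (m : Int)) = false := by
        rw [pvAnyKey _ _ (pvMapFstA dv m)]
        exact decide_eq_false hmem
      have haddeq : PySem.Set.add (pvK dv m) (pvNormA dv (m : Int))
          = pvK dv m ++ [pvNormA dv (m : Int)] := by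
        simp only [PySem.Set.add]
        rw [if_neg (fun hc => hmem ((PySem.Set.contains_iff _ _).mp hc))]
      simp only [hcont, if_true]
      simp only [PySem.Dict.insert, hcont, Bool.false_eq_true, if_false]
      rw [pvKsucc, haddeq]
      apply congrArg PySem.Dict.mk
      rw [List.map_append]
      apply congrArg₂ (· ++ ·)
      · apply List.map_congr_left
        intro s hs
        have h2 : (pvNormA dv (m : Int) == s) = false := by
          have hne : s ≠ pvNormA dv (m : Int) := fun h => hmem (h ▸ hs)
          simp [Ne.symm hne]
        simp [pvGsucc, h2]
      · simp [pvGsucc, pvGrpNil dv m hmem]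

-- B's str2ix loop builds the first-appearance index dict
lemma pvPhiB (dv : List String) (m : Nat) :
    (((PySem.List.pyRange 0 (m : Int) 1).map (fun i => pvNormA dv i)).foldl
      (fun d s => if d.contains s = false then d.insert s (d.size : Int) else d) PySem.Dict.empty)
    = PySem.Dict.mk ((PySem.List.enumerate (pvK dv m) 0).map (fun p => (p.2, p.1))) := by
  induction m with
  | zero =>
    have h0 : PySem.List.pyRange 0 ((0 : Nat) : Int) 1 = [] :=
      PySem.List.pyRange_one_eq_nil (by norm_num)
    rw [h0]
    simp [pvK, PySem.Set.ofList_nil, PySem.List.enumerate_nil, PySem.Dict.empty]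
  | succ m ih =>
    rw [pvRangeSucc, List.map_append, List.foldl_append, ih]
    simp only [List.map_cons, List.map_nil, List.foldl_cons, List.foldl_nil]
    by_cases hmem : pvNormA dv (m : Int) ∈ pvK dv m
    · have hcont : (PySem.Dict.mk ((PySem.List.enumerate (pvK dv m) 0).map (fun p => (p.2, p.1)))).contains
          (pvNormA dv (m : Int)) = true := by
        rw [pvAnyKey _ _ (pvMapFstB dv m)]
        exact decide_eq_true hmem
      simp only [hcont, Bool.true_eq_false, if_false]
      rw [pvKsucc]
      have haddeq : PySem.Set.add (pvK dv m) (pvNormA dv (m : Int)) = pvK dv m := by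
        simp only [PySem.Set.add]
        rw [if_pos ((PySem.Set.contains_iff _ _).mpr hmem)]
      rw [haddeq]
    · have hcont : (PySem.Dict.mk ((PySem.List.enumerate (pvK dv m) 0).map (fun p => (p.2, p.1)))).contains
          (pvNormA dv (m : Int)) = false := by
        rw [pvAnyKey _ _ (pvMapFstB dv m)]
        exact decide_eq_false hmem
      simp only [hcont, if_true]
      simp only [PySem.Dict.insert, hcont, Bool.false_eq_true, if_false]
      have haddeq : PySem.Set.add (pvK dv m) (pvNormA dv (m : Int))
          = pvK dv m ++ [pvNormA dv (m : Int)] := by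
        simp only [PySem.Set.add]
        rw [if_neg (fun hc => hmem ((PySem.Set.contains_iff _ _).mp hc))]
      rw [pvKsucc, haddeq, PySem.List.enumerate_append]
      apply congrArg PySem.Dict.mk
      rw [List.map_append]
      apply congrArg₂ (· ++ ·)
      · rfl
      · simp [PySem.Dict.size, PySem.List.enumerate_cons, PySem.List.enumerate_nil,
              PySem.List.length_enumerate]

lemma pvEnumMap {A B : Type} (f : A → B) (xs : List A) (s : Int) :
    PySem.List.enumerate (xs.map f) s = (PySem.List.enumerate xs s).map (fun p => (p.1, f p.2)) := by
  induction xs generalizing s with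
  | nil => simp [PySem.List.enumerate_nil]
  | cons x xs ih => simp [PySem.List.enumerate_cons, ih]

lemma pvFlatMapEnum {A C : Type} (h : A → List C) (xs : List A) (s : Int) :
    (PySem.List.enumerate xs s).flatMap (fun p => h p.2) = xs.flatMap h := by
  induction xs generalizing s with
  | nil => simp [PySem.List.enumerate_nil]
  | cons x xs ih => simp [PySem.List.enumerate_cons, ih]

lemma pvFlatMapMap {A B C : Type} (f : A → B) (g : B → List C) (l : List A) :
    (l.map f).flatMap g = l.flatMap (fun a => g (f a)) := by
  induction l with
  | nil => rfl
  | cons x l ih => simp [ih]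

-- a nested loop inserting fresh distinct keys appends all its pairs
lemma pvGen {B : Type} (L : List B) (kf : B → List Int) (vf : B → Int) (t : PySem.Dict Int Int)
    (hf : ∀ a ∈ L, ∀ i ∈ kf a, t.contains i = false)
    (hnd : (L.flatMap kf).Nodup) :
    (L.foldl (fun t a => (kf a).foldl (fun t i => t.insert i (vf a)) t) t).items
      = t.items ++ L.flatMap (fun a => (kf a).map (fun i => (i, vf a))) := by
  induction L generalizing t with
  | nil => simp
  | cons a L ih =>
    rw [List.flatMap_cons, List.nodup_append] at hnd
    obtain ⟨h1, h2, h3⟩ := hnd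
    have hfa : ∀ i ∈ kf a, t.contains i = false := hf a (by simp)
    have hit := PySem.Dict.items_foldl_insert_fresh (kf a) (fun i => i) (fun _ => vf a) t hfa
      (by simpa using h1)
    have hcont : ∀ b ∈ L, ∀ i ∈ kf b,
        ((kf a).foldl (fun t i => t.insert i (vf a)) t).contains i = false := by
      intro b hb i hi
      have hnt : t.contains i = false := hf b (by simp [hb]) i hi
      have hnk : i ∉ kf a := fun hik => h3 i hik i (List.mem_flatMap.mpr ⟨b, hb, hi⟩) rfl
      simp only [PySem.Dict.contains] at hnt ⊢
      rw [hit, List.any_append, List.any_map]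
      simp only [hnt, Bool.false_or]
      rw [List.any_eq_false]
      intro j hj
      simp only [Function.comp_def]
      intro hji
      exact hnk ((eq_of_beq hji) ▸ hj)
    rw [List.foldl_cons, ih _ hcont h2, hit, List.flatMap_cons, List.append_assoc]

-- the groups of distinct normalized strings are pairwise disjoint sublists of a nodup range
lemma pvNodupFlat (dv : List String) (n : Nat) (K : List String) (hK : K.Nodup) :
    (K.flatMap (fun s => pvGrp dv n s)).Nodup := by
  induction K with
  | nil => simp
  | cons s K ih =>
    rw [List.flatMap_cons, List.nodup_append]
    rw [List.nodup_cons] at hK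
    refine ⟨by unfold pvGrp; exact (PySem.List.nodup_pyRange_one 0 (n : Int)).filter _,
      ih hK.2, ?_⟩
    intro a ha b hb hab
    subst hab
    rw [List.mem_flatMap] at hb
    obtain ⟨s', hs', hb⟩ := hb
    simp only [pvGrp] at ha hb
    have h1 : pvNormA dv a = s :=
      eq_of_beq (List.of_mem_filter (p := fun i => pvNormA dv i == s) ha)
    have h2 : pvNormA dv a = s' :=
      eq_of_beq (List.of_mem_filter (p := fun i => pvNormA dv i == s') hb)
    exact hK.1 (h1 ▸ h2 ▸ hs')

-- lookup key used by B's comprehension: the normalized index of token i (through the str2ix dict)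
def pvKeyB (dv : List String) (n : Nat) : Int → Int := fun i =>
  (PySem.Dict.mk ((PySem.List.enumerate (pvK dv n) 0).map (fun p => (p.2, p.1)))).getD
    (PySem.List.pyGetD ((PySem.List.pyRange 0 (n : Int) 1).map (fun i => pvNormA dv i)) i "") 0

lemma pvKeyEval (dv : List String) (n : Nat) (i : Int) (h0 : 0 ≤ i) (h1 : i < (n : Int)) :
    pvKeyB dv n i = ((pvK dv n).idxOf (pvNormA dv i) : Int) := by
  unfold pvKeyB
  rw [PySem.List.pyGetD_map_pyRange_of_nonneg _ _ _ _ h0 h1]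
  have hs : pvNormA dv i ∈ pvK dv n := by
    unfold pvK
    rw [PySem.Set.mem_ofList]
    exact List.mem_map_of_mem (PySem.List.mem_pyRange_one.mpr ⟨h0, h1⟩)
  have hk : (pvK dv n).idxOf (pvNormA dv i) < (pvK dv n).length := List.idxOf_lt_length_of_mem hs
  have hmem : ((pvNormA dv i), (((pvK dv n).idxOf (pvNormA dv i) : Nat) : Int)) ∈
      (PySem.List.enumerate (pvK dv n) 0).map (fun p => (p.2, p.1)) := by
    have h1' : ((0 + (((pvK dv n).idxOf (pvNormA dv i) : Nat) : Int)),
        (pvK dv n)[(pvK dv n).idxOf (pvNormA dv i)]) ∈ PySem.List.enumerate (pvK dv n) 0 :=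
      (PySem.List.mem_enumerate_iff _ _ _).mpr ⟨_, hk, rfl⟩
    have h2' := List.mem_map_of_mem (f := fun p => (p.2, p.1)) h1'
    simpa [List.getElem_idxOf hk] using h2'
  have hkeys : (PySem.Dict.mk ((PySem.List.enumerate (pvK dv n) 0).map (fun p => (p.2, p.1)))).keys.Nodup := by
    show (((PySem.List.enumerate (pvK dv n) 0).map (fun p => (p.2, p.1))).map (fun p => p.1)).Nodup
    rw [pvMapFstB]
    exact pvK_nodup dv n
  exact PySem.Dict.getD_of_mem_items _ hmem hkeys 0

lemma pvGrpMem (dv : List String) (m : Nat) (s : String) (y : Int) (h : y ∈ pvGrp dv m s) :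
    (0 ≤ y ∧ y < (m : Int)) ∧ pvNormA dv y = s := by
  unfold pvGrp at h
  rw [List.mem_filter] at h
  exact ⟨PySem.List.mem_pyRange_one.mp h.1, eq_of_beq h.2⟩

lemma pvFlatCongr {α β : Type} (l : List α) (f g : α → List β) (h : ∀ a ∈ l, f a = g a) :
    l.flatMap f = l.flatMap g := by
  induction l with
  | nil => rfl
  | cons x l ih =>
    simp only [List.flatMap_cons, h x (by simp)]
    rw [ih (fun a ha => h a (by simp [ha]))]

lemma pvMapFlat {α β γ : Type} (l : List α) (g : α → List β) (f : β → γ) :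
    (l.flatMap g).map f = l.flatMap (fun a => (g a).map f) := by
  induction l with
  | nil => rfl
  | cons x l ih => simp [ih]

lemma pvMemK (dv : List String) (m : Nat) (s : String) :
    s ∈ pvK dv m ↔ ∃ i : Nat, i < m ∧ pvNormA dv (i : Int) = s := by
  unfold pvK
  rw [PySem.Set.mem_ofList, List.mem_map]
  constructor
  · rintro ⟨x, hx, rfl⟩
    obtain ⟨h0, h1⟩ := PySem.List.mem_pyRange_one.mp hx
    refine ⟨x.toNat, by omega, by rw [Int.toNat_of_nonneg h0]⟩
  · rintro ⟨i, hi, rfl⟩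
    exact ⟨(i : Int), PySem.List.mem_pyRange_one.mpr ⟨Int.natCast_nonneg i, by exact_mod_cast hi⟩, rfl⟩

-- under the contiguity precondition, flattening the groups in first-appearance order is range(m)
lemma pvFlatRange (dv : List String) (n : Nat)
    (hc : ∀ j : Nat, j < n →
      (∃ i : Nat, i < j ∧ pvNormA dv (i : Int) = pvNormA dv (j : Int)) →
      0 < j ∧ pvNormA dv ((j - 1 : Nat) : Int) = pvNormA dv (j : Int)) :
    ∀ m : Nat, m ≤ n →
      (pvK dv m).flatMap (fun s => pvGrp dv m s) = PySem.List.pyRange 0 (m : Int) 1 ∧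
      (0 < m → (pvK dv m).getLast? = some (pvNormA dv ((m - 1 : Nat) : Int))) := by
  intro m
  induction m with
  | zero =>
    intro _
    rw [PySem.List.pyRange_one_eq_nil (by norm_num)]
    constructor
    · simp [pvK, PySem.Set.ofList_nil]
    · omega
  | succ m ih =>
    intro hmn
    obtain ⟨ihf, ihl⟩ := ih (Nat.le_of_succ_le hmn)
    have hmlt : m < n := hmn
    by_cases hmem : pvNormA dv (m : Int) ∈ pvK dv m
    · -- seen before: contiguity forces it to be the last distinct string
      obtain ⟨hpos, hprev⟩ := hc m hmlt ((pvMemK dv m _).mp hmem)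
      have hlast : (pvK dv m).getLast? = some (pvNormA dv (m : Int)) := by
        rw [ihl hpos, hprev]
      have hne : pvK dv m ≠ [] := by
        intro h; rw [h] at hlast; simp at hlast
      have hgl : (pvK dv m).getLast hne = pvNormA dv (m : Int) := by
        have := List.getLast?_eq_some_getLast (l := pvK dv m) hne
        rw [this] at hlast
        exact Option.some.inj hlast
      have hsplit : pvK dv m = (pvK dv m).dropLast ++ [pvNormA dv (m : Int)] := by
        conv_lhs => rw [← List.dropLast_concat_getLast hne]
        rw [hgl]
      have hKs : pvK dv (m + 1) = pvK dv m := by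
        rw [pvKsucc]
        simp only [PySem.Set.add]
        rw [if_pos ((PySem.Set.contains_iff _ _).mpr hmem)]
      have hndm := pvK_nodup dv m
      have hnotinP : pvNormA dv (m : Int) ∉ (pvK dv m).dropLast := by
        rw [hsplit, List.nodup_append] at hndm
        exact fun hP => hndm.2.2 _ hP _ (by simp) rfl
      constructor
      · rw [hKs]
        conv_lhs => rw [hsplit]
        rw [List.flatMap_append, List.flatMap_cons, List.flatMap_nil]
        have hP : (pvK dv m).dropLast.flatMap (fun s => pvGrp dv (m + 1) s)
            = (pvK dv m).dropLast.flatMap (fun s => pvGrp dv m s) := by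
          apply pvFlatCongr
          intro s hs
          rw [pvGsucc]
          have hne2 : pvNormA dv (m : Int) ≠ s := fun h => hnotinP (h ▸ hs)
          simp [hne2]
        have hX : pvGrp dv (m + 1) (pvNormA dv (m : Int))
            = pvGrp dv m (pvNormA dv (m : Int)) ++ [(m : Int)] := by
          rw [pvGsucc]; simp
        rw [hP, hX, List.append_nil, pvRangeSucc, ← ihf]
        conv_rhs => rw [hsplit]
        simp [List.flatMap_append]
      · intro _
        rw [hKs, hlast]
        simp
    · -- brand-new string: appended at the end
      have hKs : pvK dv (m + 1) = pvK dv m ++ [pvNormA dv (m : Int)] := by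
        rw [pvKsucc]
        simp only [PySem.Set.add]
        rw [if_neg (fun hc' => hmem ((PySem.Set.contains_iff _ _).mp hc'))]
      constructor
      · rw [hKs, List.flatMap_append, List.flatMap_cons, List.flatMap_nil]
        have hP : (pvK dv m).flatMap (fun s => pvGrp dv (m + 1) s)
            = (pvK dv m).flatMap (fun s => pvGrp dv m s) := by
          apply pvFlatCongr
          intro s hs
          rw [pvGsucc]
          have hne2 : pvNormA dv (m : Int) ≠ s := fun h => hmem (h ▸ hs)
          simp [hne2]
        have hX : pvGrp dv (m + 1) (pvNormA dv (m : Int)) = [(m : Int)] := by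
          rw [pvGsucc, pvGrpNil dv m hmem]
          simp
        rw [hP, hX, List.append_nil, ihf, pvRangeSucc]
      · intro _
        rw [hKs, List.getLast?_concat]
        simp

-- B's token pairs equal A's grouped token pairs when read through the flattened groups
lemma pvTokEq (dv : List String) (n : Nat) :
    ((pvK dv n).flatMap (fun s => pvGrp dv n s)).map (fun i => (i, pvKeyB dv n i))
      = (PySem.List.enumerate (pvK dv n) 0).flatMap
          (fun p => (pvGrp dv n p.2).map (fun i => (i, p.1))) := by
  rw [pvMapFlat]
  have hR : (PySem.List.enumerate (pvK dv n) 0).flatMap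
        (fun p => (pvGrp dv n p.2).map (fun i => (i, p.1)))
      = (PySem.List.enumerate (pvK dv n) 0).flatMap
        (fun p => (pvGrp dv n p.2).map (fun i => (i, (((pvK dv n).idxOf p.2 : Nat) : Int)))) := by
    apply pvFlatCongr
    intro p hp
    rw [PySem.List.mem_enumerate_iff] at hp
    obtain ⟨k, hk, rfl⟩ := hp
    have hid : (pvK dv n).idxOf (pvK dv n)[k] = k := by
      have hmem : (pvK dv n)[k] ∈ pvK dv n := List.getElem_mem hk
      have hlt := List.idxOf_lt_length_of_mem hmem
      have hgi := List.getElem_idxOf hlt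
      exact ((pvK_nodup dv n).getElem_inj_iff).mp hgi
    simp [hid]
  rw [hR, pvFlatMapEnum (fun s => (pvGrp dv n s).map
    (fun i => (i, (((pvK dv n).idxOf s : Nat) : Int)))) (pvK dv n) 0]
  apply pvFlatCongr
  intro s hs
  apply List.map_congr_left
  intro i hi
  obtain ⟨⟨h0m, h1m⟩, hnorm⟩ := pvGrpMem dv n s i hi
  rw [pvKeyEval dv n i h0m h1m, hnorm]

set_option maxHeartbeats 1000000 in
theorem create_normalized_vocab_spec : Claim_equal_create_normalized_vocab := by
  intro vocab_df dv _ hpre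
  unfold Spec_create_normalized_vocab
  simp only [create_normalized_vocab, create_normalized_vocab_alt]
  rw [pvPhiA dv vocab_df.length, pvPhiB dv vocab_df.length]
  have hproj1 : ∀ (L : List (String × List Int)), (PySem.Dict.mk L).items = L := fun _ => rfl
  have hproj2 : ∀ (L : List (String × Int)), (PySem.Dict.mk L).items = L := fun _ => rfl
  rw [hproj1, hproj2]
  rw [pvEnumMap]
  rw [PySem.List.foldl_prod_mk
    (fun (d : PySem.Dict Int String) (p : Int × (String × List Int)) => d.insert p.1 p.2.1)
    (fun (t : PySem.Dict Int Int) (p : Int × (String × List Int)) =>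
      p.2.2.foldl (fun t token_ix => t.insert token_ix p.1) t)]
  dsimp only
  have hkp : ∀ i : Int,
      (PySem.Dict.mk ((PySem.List.enumerate (pvK dv vocab_df.length) 0).map
        (fun p => (p.2, p.1)))).getD
        (PySem.List.pyGetD ((PySem.List.pyRange 0 ((vocab_df.length : Nat) : Int) 1).map
          (fun i => pvNormA dv i)) i "") 0
      = pvKeyB dv vocab_df.length i := fun _ => rfl
  simp only [hkp]
  set n := vocab_df.length with hn
  have hflatrange : (pvK dv n).flatMap (fun s => pvGrp dv n s) = PySem.List.pyRange 0 (n : Int) 1 :=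
    (pvFlatRange dv n hpre.2 n le_rfl).1
  set K := pvK dv n with hKdef
  set LA := (PySem.List.enumerate K 0).map
      (fun p => (p.1, (p.2, pvGrp dv n p.2))) with hLA
  set E := (PySem.List.enumerate K 0).map (fun p => (p.2, p.1)) with hE
  have hEid : (PySem.List.enumerate K 0).map (fun p : Int × String => (p.1, p.2))
      = PySem.List.enumerate K 0 := by simp
  have hndfstA : (LA.map (fun p => p.1)).Nodup := by
    rw [hLA, List.map_map]
    have h : ((fun p : Int × (String × List Int) => p.1)
        ∘ (fun p : Int × String => (p.1, (p.2, pvGrp dv n p.2)))) = fun p : Int × String => p.1 := rfl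
    rw [h, PySem.List.map_fst_enumerate]
    exact PySem.List.nodup_pyRange_one _ _
  have hAdec : (List.foldl (fun (d : PySem.Dict Int String) (p : Int × (String × List Int)) =>
        d.insert p.1 p.2.1) PySem.Dict.empty LA).items
      = PySem.Dict.empty.items ++ LA.map (fun p => (p.1, p.2.1)) :=
    PySem.Dict.items_foldl_insert_fresh LA (fun p => p.1) (fun p => p.2.1)
      PySem.Dict.empty (fun a _ => PySem.Dict.contains_empty _) hndfstA
  have hndflat : (K.flatMap (fun s => pvGrp dv n s)).Nodup := pvNodupFlat dv n K (pvK_nodup dv n)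
  have hflatA : LA.flatMap (fun p => p.2.2) = K.flatMap (fun s => pvGrp dv n s) := by
    rw [hLA, pvFlatMapMap]
    dsimp only
    exact pvFlatMapEnum (fun s => pvGrp dv n s) K 0
  have hAtok : (List.foldl (fun (t : PySem.Dict Int Int) (p : Int × (String × List Int)) =>
        List.foldl (fun t i => t.insert i p.1) t p.2.2) PySem.Dict.empty LA).items
      = PySem.Dict.empty.items ++ LA.flatMap (fun p => p.2.2.map (fun i => (i, p.1))) :=
    pvGen LA (fun p => p.2.2) (fun p => p.1) PySem.Dict.empty
      (fun a _ i _ => PySem.Dict.contains_empty _) (hflatA ▸ hndflat)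
  have hpairs : E.map (fun p => (p.2, p.1)) = PySem.List.enumerate K 0 := by
    rw [hE, List.map_map]
    have h : ((fun p : String × Int => (p.2, p.1)) ∘ (fun p : Int × String => (p.2, p.1)))
        = fun p : Int × String => (p.1, p.2) := rfl
    rw [h, hEid]
  have hndfstB : ((PySem.List.enumerate K 0).map (fun p => p.1)).Nodup := by
    rw [PySem.List.map_fst_enumerate]
    exact PySem.List.nodup_pyRange_one _ _
  have hBdec : (List.foldl (fun (d : PySem.Dict Int String) (p : Int × String) =>
        d.insert p.1 p.2) PySem.Dict.empty (PySem.List.enumerate K 0)).items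
      = PySem.Dict.empty.items ++ (PySem.List.enumerate K 0).map (fun p => (p.1, p.2)) :=
    PySem.Dict.items_foldl_insert_fresh (PySem.List.enumerate K 0) (fun p => p.1) (fun p => p.2)
      PySem.Dict.empty (fun a _ => PySem.Dict.contains_empty _) hndfstB
  have hndT : (((PySem.List.pyRange 0 (n : Int) 1).map
      (fun i => (i, pvKeyB dv n i))).map (fun p => p.1)).Nodup := by
    rw [List.map_map]
    have h : ((fun p : Int × Int => p.1) ∘ (fun i : Int => (i, pvKeyB dv n i))) = fun i : Int => i := rfl
    rw [h]
    simpa using PySem.List.nodup_pyRange_one 0 (n : Int)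
  have hBtok : (List.foldl (fun (d : PySem.Dict Int Int) (p : Int × Int) =>
        d.insert p.1 p.2) PySem.Dict.empty
        ((PySem.List.pyRange 0 (n : Int) 1).map (fun i => (i, pvKeyB dv n i)))).items
      = PySem.Dict.empty.items ++ ((PySem.List.pyRange 0 (n : Int) 1).map
          (fun i => (i, pvKeyB dv n i))).map (fun p => (p.1, p.2)) :=
    PySem.Dict.items_foldl_insert_fresh
      ((PySem.List.pyRange 0 (n : Int) 1).map (fun i => (i, pvKeyB dv n i)))
      (fun p => p.1) (fun p => p.2)
      PySem.Dict.empty (fun a _ => PySem.Dict.contains_empty _) hndT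
  rw [hAdec, hAtok]
  simp only [PySem.Dict.ofList, PySem.Dict.update, hpairs, hBdec, hBtok]
  apply Prod.ext
  · show PySem.Dict.empty.items ++ LA.map (fun p => (p.1, p.2.1))
        = PySem.Dict.empty.items ++ (PySem.List.enumerate K 0).map (fun p => (p.1, p.2))
    rw [hLA, List.map_map]
    rfl
  · show PySem.Dict.empty.items ++ LA.flatMap (fun p => (p.2.2).map (fun i => (i, p.1)))
        = PySem.Dict.empty.items ++ ((PySem.List.pyRange 0 (n : Int) 1).map
            (fun i => (i, pvKeyB dv n i))).map (fun p => (p.1, p.2))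
    have hmapid : ((PySem.List.pyRange 0 (n : Int) 1).map (fun i => (i, pvKeyB dv n i))).map
        (fun p : Int × Int => (p.1, p.2))
        = (PySem.List.pyRange 0 (n : Int) 1).map (fun i => (i, pvKeyB dv n i)) := by
      rw [List.map_map]
      rfl
    rw [hmapid, ← hflatrange, pvTokEq dv n, hLA, pvFlatMapMap]
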